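-- pv_equiv track=rewrite | github.com/cybelewang/leetcode-python | code978LongestTurbulentSubarray.py | maxTurbulenceSize2
-- ===== SOURCE A (Python) =====
-- def maxTurbulenceSize2(A):
--     # relation: 1 for A[i-1] < A[i], -1 for A[i-1] > A[i], 0 for A[i-1] == A[i]
--     # edges represent numbers of continuous turblent edges
--     relation, edges, res = 0, 0, 1
--
--     for i in range(1, len(A)):
--         if A[i] > A[i-1]:
--             if i == 1 or relation == -1:
--                 edges += 1
--                 res = max(res, edges+1)
--             else:
--                 edges = 1
--             relation = 1
--         elif A[i] < A[i-1]:
--             if i == 1 or relation == 1: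
--                 edges += 1
--                 res = max(res, edges+1)
--             else:
--                 edges = 1
--             relation = -1
--         else:
--             relation, edges = 0, 0
--
--     return res
-- ===== SOURCE B (Python) =====
-- def maxTurbulenceSize2(A):
--     best = up = down = 1
--     for prev, cur in zip(A, A[1:]):
--         if cur > prev:
--             up, down = down + 1, 1
--         elif cur < prev:
--             down, up = up + 1, 1
--         else:
--             up = down = 1
--         best = max(best, up, down)
--     return best
-- ===== Notes on version B (the rewrite author's own statement) =====
-- stated objective: simpler
-- what changed: Replaces A's relation-flag-plus-edge-counter scan over indices with the standard two-state DP over adjacent pairs (running lengths of turbulent runs ending in an up-step vs a down-step), which also fixes A's missed length-2 runs.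
-- intended difference: On arrays whose first two elements are equal but which contain some unequal adjacent pair and never a strict up-step immediately followed by a strict down-step (or vice versa), e.g. [1,1,2], A returns 1 while B returns 2; the intended answer is 2 because a length-2 turbulent subarray exists, A just never credits a single turbulent edge unless it is the first pair or extends an alternation. — e.g. on maxTurbulenceSize2([1, 1, 2]): A returns 1, B returns 2
import Mathlib
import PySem

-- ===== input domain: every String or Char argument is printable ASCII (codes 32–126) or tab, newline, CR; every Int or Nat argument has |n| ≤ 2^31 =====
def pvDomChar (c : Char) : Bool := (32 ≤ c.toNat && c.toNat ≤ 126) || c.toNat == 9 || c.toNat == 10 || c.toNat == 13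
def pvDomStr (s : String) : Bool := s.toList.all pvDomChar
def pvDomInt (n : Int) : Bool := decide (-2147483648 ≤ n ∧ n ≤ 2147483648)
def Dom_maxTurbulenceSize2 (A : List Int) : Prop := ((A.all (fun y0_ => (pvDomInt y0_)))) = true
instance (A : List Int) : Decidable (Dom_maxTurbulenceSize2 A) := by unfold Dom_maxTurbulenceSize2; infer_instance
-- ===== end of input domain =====

-- B replaces A's relation-flag/edge-counter index scan with the standard two-state DP over adjacent
-- pairs (simpler); intended difference: A misses length-2 turbulent runs after an equal leading pair (D_ below).


-- ===== PORT A =====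
-- loop body of A: state (relation, edges, res), loop variable i
def stepA (A : List Int) (st : Int × Int × Int) (i : Int) : Int × Int × Int :=
  if PySem.List.pyGetD A (i - 1) 0 < PySem.List.pyGetD A i 0 then
    if i = 1 ∨ st.1 = -1 then (1, st.2.1 + 1, max st.2.2 (st.2.1 + 1 + 1)) else (1, 1, st.2.2)
  else if PySem.List.pyGetD A i 0 < PySem.List.pyGetD A (i - 1) 0 then
    if i = 1 ∨ st.1 = 1 then (-1, st.2.1 + 1, max st.2.2 (st.2.1 + 1 + 1)) else (-1, 1, st.2.2)
  else (0, 0, st.2.2)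

def maxTurbulenceSize2 (A : List Int) : Int :=
  ((PySem.List.pyRange 1 (A.length : Int) 1).foldl (stepA A) (0, 0, 1)).2.2

-- ===== PORT B =====
-- loop body of B: state (up, down, best), loop variable the pair (prev, cur)
def stepB (st : Int × Int × Int) (pc : Int × Int) : Int × Int × Int :=
  let ud : Int × Int :=
    if pc.1 < pc.2 then (st.2.1 + 1, 1)
    else if pc.2 < pc.1 then (1, st.1 + 1)
    else (1, 1)
  (ud.1, ud.2, max (max st.2.2 ud.1) ud.2)

def maxTurbulenceSize2_alt (A : List Int) : Int :=
  ((A.zip (PySem.List.slice A (some 1) none)).foldl stepB (1, 1, 1)).2.2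

-- ===== PRECONDITION & SPEC =====
-- On arrays whose first two elements are equal but which contain an unequal adjacent pair and no
-- strict up-step adjacent to a strict down-step, A returns 1 while B returns 2; B's value is intended,
-- since such arrays contain a turbulent subarray of length 2 that A never credits.
def D_maxTurbulenceSize2 (A : List Int) : Prop :=
  A.take 1 = A.tail.take 1 ∧ (∃ q ∈ A.zip A.tail, q.1 ≠ q.2) ∧
  (A.zip A.tail).IsChain fun q r => 0 ≤ (q.1 - q.2) * (r.1 - r.2)
instance (A : List Int) : Decidable (D_maxTurbulenceSize2 A) := by unfold D_maxTurbulenceSize2; infer_instance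

def Spec_maxTurbulenceSize2 (A : List Int) (out : Int) : Prop := ¬ D_maxTurbulenceSize2 A → out = maxTurbulenceSize2_alt A
instance (A : List Int) (out : Int) : Decidable (Spec_maxTurbulenceSize2 A out) := by unfold Spec_maxTurbulenceSize2; infer_instance

def pvDiffWitness_maxTurbulenceSize2 : List Int := [1, 1, 2]
def pvDiffWitnessOut_maxTurbulenceSize2 : Int × Int := (1, 2)

-- ===== CLAIM (what is proved, stated in full; the proofs are below) =====
def Claim_unchanged_maxTurbulenceSize2 : Prop := ∀ (A : List Int), Dom_maxTurbulenceSize2 A → Spec_maxTurbulenceSize2 A (maxTurbulenceSize2 A)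
def Claim_changed_maxTurbulenceSize2 : Prop := Dom_maxTurbulenceSize2 (pvDiffWitness_maxTurbulenceSize2) ∧ D_maxTurbulenceSize2 (pvDiffWitness_maxTurbulenceSize2) ∧ maxTurbulenceSize2 (pvDiffWitness_maxTurbulenceSize2) = pvDiffWitnessOut_maxTurbulenceSize2.1 ∧ maxTurbulenceSize2_alt (pvDiffWitness_maxTurbulenceSize2) = pvDiffWitnessOut_maxTurbulenceSize2.2 ∧ pvDiffWitnessOut_maxTurbulenceSize2.1 ≠ pvDiffWitnessOut_maxTurbulenceSize2.2
def Claim_exact_maxTurbulenceSize2 : Prop := ∀ (A : List Int), Dom_maxTurbulenceSize2 A → D_maxTurbulenceSize2 A → maxTurbulenceSize2 A ≠ maxTurbulenceSize2_alt A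

-- ===== LEMMAS AND PROOFS =====

-- A's loop body for i ≥ 2, as a function of the pair (A[i-1], A[i])
def stepPA (st : Int × Int × Int) (pc : Int × Int) : Int × Int × Int :=
  if pc.1 < pc.2 then
    if st.1 = -1 then (1, st.2.1 + 1, max st.2.2 (st.2.1 + 1 + 1)) else (1, 1, st.2.2)
  else if pc.2 < pc.1 then
    if st.1 = 1 then (-1, st.2.1 + 1, max st.2.2 (st.2.1 + 1 + 1)) else (-1, 1, st.2.2)
  else (0, 0, st.2.2)

-- "no continuation branch of A ever fires", given incoming relation flag
def ANoCont : Int → List (Int × Int) → Prop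
  | _, [] => True
  | rel, q :: t =>
    if q.1 < q.2 then rel ≠ -1 ∧ ANoCont 1 t
    else if q.2 < q.1 then rel ≠ 1 ∧ ANoCont (-1) t
    else ANoCont 0 t

-- coupling invariant between A's state (rel, edges, res) and B's state (up, down, best)
def InvS (rel edges res up down best : Int) : Prop :=
  ((rel = 1 ∧ up = edges + 1 ∧ down = 1 ∧ 1 ≤ edges)
    ∨ (rel = -1 ∧ down = edges + 1 ∧ up = 1 ∧ 1 ≤ edges)
    ∨ (rel = 0 ∧ up = 1 ∧ down = 1 ∧ edges = 0))
  ∧ up ≤ best ∧ down ≤ best ∧ 1 ≤ res ∧ (res = best ∨ (res = 1 ∧ best = 2))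

lemma main_inv : ∀ (ps : List (Int × Int)) (rel edges res up down best : Int),
    InvS rel edges res up down best →
    InvS (ps.foldl stepPA (rel, edges, res)).1 (ps.foldl stepPA (rel, edges, res)).2.1
      (ps.foldl stepPA (rel, edges, res)).2.2 (ps.foldl stepB (up, down, best)).1
      (ps.foldl stepB (up, down, best)).2.1 (ps.foldl stepB (up, down, best)).2.2 ∧
    (((ps.foldl stepPA (rel, edges, res)).2.2 = 1 ∧ (ps.foldl stepB (up, down, best)).2.2 = 2) ↔
      (res = 1 ∧ ANoCont rel ps ∧ (best = 2 ∨ (best = 1 ∧ ∃ q ∈ ps, q.1 ≠ q.2)))) := by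
  intro ps
  induction ps with
  | nil =>
    intro rel edges res up down best hinv
    refine ⟨hinv, ?_⟩
    simp [ANoCont]
  | cons pc t ih =>
    intro rel edges res up down best hinv
    obtain ⟨p, c⟩ := pc
    simp only [List.foldl_cons]
    rcases lt_trichotomy p c with hpc | hpc | hpc
    · -- up-step
      by_cases hrel : rel = -1
      · have e1 : stepPA (rel, edges, res) (p, c) = (1, edges + 1, max res (edges + 1 + 1)) := by
          simp [stepPA, hpc, hrel]
        have e2 : stepB (up, down, best) (p, c) = (down + 1, 1, max (max best (down + 1)) 1) := by
          simp [stepB, hpc]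
        rw [e1, e2]
        have hinv' : InvS 1 (edges + 1) (max res (edges + 1 + 1)) (down + 1) 1
            (max (max best (down + 1)) 1) := by
          unfold InvS at hinv ⊢; omega
        obtain ⟨g1, g2⟩ := ih _ _ _ _ _ _ hinv'
        refine ⟨g1, ?_⟩
        rw [g2]
        clear g1 g2 ih e1 e2
        simp only [ANoCont, if_pos hpc]
        unfold InvS at hinv
        constructor
        · rintro ⟨h1, -, -⟩; exfalso; omega
        · rintro ⟨-, ⟨hne, -⟩, -⟩; exact absurd hrel hne
      · have e1 : stepPA (rel, edges, res) (p, c) = (1, 1, res) := by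
          simp [stepPA, hpc, hrel]
        have e2 : stepB (up, down, best) (p, c) = (down + 1, 1, max (max best (down + 1)) 1) := by
          simp [stepB, hpc]
        rw [e1, e2]
        have hinv' : InvS 1 1 res (down + 1) 1 (max (max best (down + 1)) 1) := by
          unfold InvS at hinv ⊢; omega
        obtain ⟨g1, g2⟩ := ih _ _ _ _ _ _ hinv'
        refine ⟨g1, ?_⟩
        rw [g2]
        clear g1 g2 ih e1 e2
        simp only [ANoCont, if_pos hpc, List.mem_cons]
        unfold InvS at hinv
        constructor
        · rintro ⟨h1, hC, h3⟩
          refine ⟨h1, ⟨hrel, hC⟩, ?_⟩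
          have hb : best = 1 ∨ best = 2 := by omega
          rcases hb with hb | hb
          · exact Or.inr ⟨hb, ⟨(p, c), Or.inl rfl, by simpa using hpc.ne⟩⟩
          · exact Or.inl hb
        · rintro ⟨h1, ⟨-, hC⟩, h3⟩
          refine ⟨h1, hC, ?_⟩
          rcases h3 with h3 | ⟨h3, -⟩ <;> [left; left] <;> omega
    · -- equal pair
      have hn1 : ¬ p < c := by omega
      have hn2 : ¬ c < p := by omega
      have e1 : stepPA (rel, edges, res) (p, c) = (0, 0, res) := by
        simp [stepPA, hn1, hn2]
      have e2 : stepB (up, down, best) (p, c) = (1, 1, max (max best 1) 1) := by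
        simp [stepB, hn1, hn2]
      rw [e1, e2]
      have hinv' : InvS 0 0 res 1 1 (max (max best 1) 1) := by
        unfold InvS at hinv ⊢; omega
      obtain ⟨g1, g2⟩ := ih _ _ _ _ _ _ hinv'
      refine ⟨g1, ?_⟩
      rw [g2]
      clear g1 g2 ih e1 e2
      simp only [ANoCont, if_neg hn1, if_neg hn2, List.mem_cons]
      unfold InvS at hinv
      constructor
      · rintro ⟨h1, hC, h3⟩
        refine ⟨h1, hC, ?_⟩
        rcases h3 with h3 | ⟨h3, q, hq, hqne⟩
        · left; omega
        · exact Or.inr ⟨by omega, q, Or.inr hq, hqne⟩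
      · rintro ⟨h1, hC, h3⟩
        refine ⟨h1, hC, ?_⟩
        rcases h3 with h3 | ⟨h3, q, hq, hqne⟩
        · left; omega
        · rcases hq with rfl | hq
          · exact absurd hpc hqne
          · exact Or.inr ⟨by omega, q, hq, hqne⟩
    · -- down-step
      have hn1 : ¬ p < c := by omega
      by_cases hrel : rel = 1
      · have e1 : stepPA (rel, edges, res) (p, c) = (-1, edges + 1, max res (edges + 1 + 1)) := by
          simp [stepPA, hn1, hpc, hrel]
        have e2 : stepB (up, down, best) (p, c) = (1, up + 1, max (max best 1) (up + 1)) := by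
          simp [stepB, hn1, hpc]
        rw [e1, e2]
        have hinv' : InvS (-1) (edges + 1) (max res (edges + 1 + 1)) 1 (up + 1)
            (max (max best 1) (up + 1)) := by
          unfold InvS at hinv ⊢; omega
        obtain ⟨g1, g2⟩ := ih _ _ _ _ _ _ hinv'
        refine ⟨g1, ?_⟩
        rw [g2]
        clear g1 g2 ih e1 e2
        simp only [ANoCont, if_neg hn1, if_pos hpc]
        unfold InvS at hinv
        constructor
        · rintro ⟨h1, -, -⟩; exfalso; omega
        · rintro ⟨-, ⟨hne, -⟩, -⟩; exact absurd hrel hne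
      · have e1 : stepPA (rel, edges, res) (p, c) = (-1, 1, res) := by
          simp [stepPA, hn1, hpc, hrel]
        have e2 : stepB (up, down, best) (p, c) = (1, up + 1, max (max best 1) (up + 1)) := by
          simp [stepB, hn1, hpc]
        rw [e1, e2]
        have hinv' : InvS (-1) 1 res 1 (up + 1) (max (max best 1) (up + 1)) := by
          unfold InvS at hinv ⊢; omega
        obtain ⟨g1, g2⟩ := ih _ _ _ _ _ _ hinv'
        refine ⟨g1, ?_⟩
        rw [g2]
        clear g1 g2 ih e1 e2
        simp only [ANoCont, if_neg hn1, if_pos hpc, List.mem_cons]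
        unfold InvS at hinv
        constructor
        · rintro ⟨h1, hC, h3⟩
          refine ⟨h1, ⟨hrel, hC⟩, ?_⟩
          have hb : best = 1 ∨ best = 2 := by omega
          rcases hb with hb | hb
          · exact Or.inr ⟨hb, ⟨(p, c), Or.inl rfl, by simpa using hpc.ne'⟩⟩
          · exact Or.inl hb
        · rintro ⟨h1, ⟨-, hC⟩, h3⟩
          refine ⟨h1, hC, ?_⟩
          rcases h3 with h3 | ⟨h3, -⟩ <;> [left; left] <;> omega

-- bridge: A's index fold over range(k, len) with k ≥ 2 is the pair fold
lemma foldA_bridge : ∀ (u : List Int) (p : Int) (pre : List Int) (st : Int × Int × Int),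
    1 ≤ pre.length →
    (PySem.List.pyRange ((pre.length : Int) + 1) (((pre ++ p :: u).length : Nat) : Int) 1).foldl
        (stepA (pre ++ p :: u)) st
      = ((p :: u).zip u).foldl stepPA st := by
  intro u
  induction u with
  | nil =>
    intro p pre st hpre
    rw [PySem.List.pyRange_one_eq_nil (by simp)]
    simp
  | cons c u ih =>
    intro p pre st hpre
    have hlen : ((pre ++ p :: c :: u).length : Int) = (pre.length : Int) + 2 + u.length := by
      simp; omega
    rw [PySem.List.pyRange_one_cons (by omega)]
    rw [List.foldl_cons]
    have hgc : PySem.List.pyGetD (pre ++ p :: c :: u) ((pre.length : Int) + 1) 0 = c := by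
      have : ((pre.length : Int) + 1) = ((pre.length + 1 : Nat) : Int) := by push_cast; ring
      rw [this, PySem.List.pyGetD_natCast]
      rw [List.getD_eq_getElem?_getD, List.getElem?_append_right (by omega)]
      simp
    have hgp : PySem.List.pyGetD (pre ++ p :: c :: u) ((pre.length : Int) + 1 - 1) 0 = p := by
      have : ((pre.length : Int) + 1 - 1) = ((pre.length : Nat) : Int) := by ring
      rw [this, PySem.List.pyGetD_natCast]
      rw [List.getD_eq_getElem?_getD, List.getElem?_append_right (by omega)]
      simp
    have hstep : stepA (pre ++ p :: c :: u) st ((pre.length : Int) + 1) = stepPA st (p, c) := by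
      have hne1 : ¬ ((pre.length : Int) + 1 = 1) := by omega
      simp only [stepA, stepPA, hgc, hgp, hne1, false_or]
    rw [hstep]
    have hA : pre ++ p :: c :: u = (pre ++ [p]) ++ c :: u := by simp
    have hk : (pre.length : Int) + 1 + 1 = (((pre ++ [p]).length : Nat) : Int) + 1 := by
      simp
    rw [hlen]
    have hlen2 : (pre.length : Int) + 2 + (u.length : Int) = (((pre ++ [p]) ++ c :: u).length : Int) := by
      simp; ring
    rw [hk, hlen2, hA]
    rw [ih c (pre ++ [p]) (stepPA st (p, c)) (by simp)]
    simp

lemma opp_prod_iff (q r : Int × Int) :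
    (0 ≤ (q.1 - q.2) * (r.1 - r.2)) ↔ ¬((q.1 < q.2 ∧ r.2 < r.1) ∨ (q.2 < q.1 ∧ r.1 < r.2)) := by
  rw [← not_lt, mul_neg_iff]
  omega

lemma anocont_iff_chain_dir : ∀ (t : List (Int × Int))  (q : Int × Int),
    ANoCont (if q.1 < q.2 then 1 else if q.2 < q.1 then -1 else 0) t ↔
      List.IsChain (fun q r => 0 ≤ (q.1 - q.2) * (r.1 - r.2)) (q :: t) := by
  intro t
  induction t with
  | nil => intro q; simp [ANoCont]
  | cons r t ih =>
    intro q
    have hqr := opp_prod_iff q r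
    rcases lt_trichotomy r.1 r.2 with h | h | h
    · rw [List.isChain_cons_cons, ← ih r, if_pos h]
      simp only [ANoCont, if_pos h]
      constructor
      · rintro ⟨h1, hC⟩
        refine ⟨hqr.mpr ?_, hC⟩
        split_ifs at h1 with g1 g2 <;> omega
      · rintro ⟨h1, hC⟩
        refine ⟨?_, hC⟩
        rw [hqr] at h1
        split_ifs with g1 g2 <;> omega
    · have h1 : ¬ r.1 < r.2 := by omega
      have h2 : ¬ r.2 < r.1 := by omega
      rw [List.isChain_cons_cons, ← ih r, if_neg h1, if_neg h2]
      have hR : 0 ≤ (q.1 - q.2) * (r.1 - r.2) := hqr.mpr (by omega)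
      simp only [ANoCont, if_neg h1, if_neg h2, hR, true_and]
    · have h1 : ¬ r.1 < r.2 := by omega
      rw [List.isChain_cons_cons, ← ih r, if_neg h1, if_pos h]
      simp only [ANoCont, if_neg h1, if_pos h]
      constructor
      · rintro ⟨h1', hC⟩
        refine ⟨hqr.mpr ?_, hC⟩
        split_ifs at h1' with g1 g2 <;> omega
      · rintro ⟨h1', hC⟩
        refine ⟨?_, hC⟩
        rw [hqr] at h1'
        split_ifs with g1 g2 <;> omega

lemma anocont_zero_iff_chain : ∀ (t : List (Int × Int)),
    ANoCont 0 t ↔ List.IsChain (fun q r => 0 ≤ (q.1 - q.2) * (r.1 - r.2)) t := by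
  intro t
  cases t with
  | nil => simp [ANoCont]
  | cons q t =>
    have h := anocont_iff_chain_dir t q
    simp only [ANoCont]
    split_ifs with g1 g2
    · rw [if_pos g1] at h
      rw [← h]; simp
    · rw [if_neg g1, if_pos g2] at h
      rw [← h]; simp
    · rw [if_neg g1, if_neg g2] at h
      exact h

lemma chain_cons_eqpair (a : Int) (ps : List (Int × Int)) :
    List.IsChain (fun q r => 0 ≤ (q.1 - q.2) * (r.1 - r.2)) ((a, a) :: ps) ↔
      List.IsChain (fun q r => 0 ≤ (q.1 - q.2) * (r.1 - r.2)) ps := by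
  cases ps with
  | nil => simp
  | cons r t =>
    rw [List.isChain_cons_cons]
    simp

lemma master (A : List Int) :
    (¬ D_maxTurbulenceSize2 A → maxTurbulenceSize2 A = maxTurbulenceSize2_alt A) ∧
    (D_maxTurbulenceSize2 A → maxTurbulenceSize2 A = 1 ∧ maxTurbulenceSize2_alt A = 2) := by
  cases A with
  | nil =>
    exact ⟨fun _ => by decide, fun hD => absurd hD (by decide)⟩
  | cons a A' =>
    cases A' with
    | nil =>
      constructor
      · intro _
        unfold maxTurbulenceSize2 maxTurbulenceSize2_alt
        rw [PySem.List.pyRange_one_eq_nil (by simp), PySem.List.slice_from_one]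
        simp
      · intro hD
        obtain ⟨-, ⟨q, hq, -⟩, -⟩ := hD
        simp at hq
    | cons b t =>
      have h1n : (1 : Int) < ((a :: b :: t).length : Int) := by
        simp [List.length_cons]
      have hbr : ∀ st : Int × Int × Int,
          (PySem.List.pyRange (1 + 1) ((a :: b :: t).length : Int) 1).foldl
              (stepA (a :: b :: t)) st
            = ((b :: t).zip t).foldl stepPA st := by
        intro st
        have h := foldA_bridge t b [a] st (by simp)
        simpa using h
      have eA : ∀ st : Int × Int × Int, maxTurbulenceSize2 (a :: b :: t)
          = (((b :: t).zip t).foldl stepPA (stepA (a :: b :: t) (0, 0, 1) 1)).2.2 := by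
        intro st
        unfold maxTurbulenceSize2
        rw [PySem.List.pyRange_one_cons h1n, List.foldl_cons, hbr]
      have eB : maxTurbulenceSize2_alt (a :: b :: t)
          = (((b :: t).zip t).foldl stepB (stepB (1, 1, 1) (a, b))).2.2 := by
        unfold maxTurbulenceSize2_alt
        rw [PySem.List.slice_from_one]
        simp only [List.tail_cons, List.zip_cons_cons, List.foldl_cons]
      have hg1 : PySem.List.pyGetD (a :: b :: t) 1 0 = b := by
        simp [pysem]
      have hg0 : PySem.List.pyGetD (a :: b :: t) (1 - 1) 0 = a := by
        norm_num
      rcases lt_trichotomy a b with hab | hab | hab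
      · -- a < b : first pair strict, D_ is false
        have sA : stepA (a :: b :: t) (0, 0, 1) 1 = (1, 1, 2) := by
          rw [stepA, hg1, hg0]
          norm_num [hab]
        have sB : stepB (1, 1, 1) (a, b) = (2, 1, 2) := by
          norm_num [stepB, hab]
        obtain ⟨g1, g2⟩ := main_inv ((b :: t).zip t) 1 1 2 2 1 2 (by unfold InvS; norm_num)
        constructor
        · intro _
          rw [eA (0,0,1), sA, eB, sB]
          have hnot : ¬(((((b :: t).zip t)).foldl stepPA (1, 1, 2)).2.2 = 1 ∧
              ((((b :: t).zip t)).foldl stepB (2, 1, 2)).2.2 = 2) := by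
            rw [g2]
            rintro ⟨h, -⟩
            exact absurd h (by norm_num)
          unfold InvS at g1
          clear g2 hbr eA eB sA sB
          omega
        · intro hD
          obtain ⟨hfst, -, -⟩ := hD
          simp at hfst
          omega
      · -- a = b : the D_ region decides it
        subst hab
        have sA : stepA (a :: a :: t) (0, 0, 1) 1 = (0, 0, 1) := by
          rw [stepA]
          have hg1' : PySem.List.pyGetD (a :: a :: t) 1 0 = a := by simp [pysem]
          have hg0' : PySem.List.pyGetD (a :: a :: t) (1 - 1) 0 = a := by
            norm_num
          rw [hg1', hg0']
          simp
        have sB : stepB (1, 1, 1) (a, a) = (1, 1, 1) := by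
          norm_num [stepB]
        obtain ⟨g1, g2⟩ := main_inv ((a :: t).zip t) 0 0 1 1 1 1 (by unfold InvS; norm_num)
        have hDiff : D_maxTurbulenceSize2 (a :: a :: t) ↔
            (ANoCont 0 ((a :: t).zip t) ∧ ∃ q ∈ (a :: t).zip t, q.1 ≠ q.2) := by
          unfold D_maxTurbulenceSize2
          simp only [List.tail_cons, List.zip_cons_cons]
          constructor
          · rintro ⟨-, ⟨q, hq, hqne⟩, hch⟩
            refine ⟨(anocont_zero_iff_chain ((a :: t).zip t)).mpr
              ((chain_cons_eqpair a ((a :: t).zip t)).mp hch), ?_⟩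
            rw [List.mem_cons] at hq
            rcases hq with hq | hq
            · subst hq; exact absurd rfl hqne
            · exact ⟨q, hq, hqne⟩
          · rintro ⟨hC, q, hq, hqne⟩
            refine ⟨by simp, ⟨q, List.mem_cons_of_mem _ hq, hqne⟩,
              (chain_cons_eqpair a ((a :: t).zip t)).mpr
                ((anocont_zero_iff_chain ((a :: t).zip t)).mp hC)⟩
        constructor
        · intro hnD
          rw [eA (0,0,1), sA, eB, sB]
          have hnot : ¬((((a :: t).zip t).foldl stepPA (0, 0, 1)).2.2 = 1 ∧
              (((a :: t).zip t).foldl stepB (1, 1, 1)).2.2 = 2) := by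
            rw [g2]
            rintro ⟨-, hC, h3⟩
            apply hnD
            apply hDiff.mpr
            rcases h3 with h3 | ⟨-, hE⟩
            · exact absurd h3 (by norm_num)
            · exact ⟨hC, hE⟩
          unfold InvS at g1
          clear g2 hDiff hbr eA eB sA sB
          omega
        · intro hD
          have hkey : (((a :: t).zip t).foldl stepPA (0, 0, 1)).2.2 = 1 ∧
              (((a :: t).zip t).foldl stepB (1, 1, 1)).2.2 = 2 := by
            rw [g2]
            have hd := hDiff.mp hD
            exact ⟨rfl, hd.1, Or.inr ⟨rfl, hd.2⟩⟩
          exact ⟨by rw [eA (0,0,1), sA]; exact hkey.1, by rw [eB, sB]; exact hkey.2⟩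
      · -- b < a : first pair strict, D_ is false
        have sA : stepA (a :: b :: t) (0, 0, 1) 1 = (-1, 1, 2) := by
          rw [stepA, hg1, hg0]
          norm_num [hab, not_lt_of_gt hab]
        have sB : stepB (1, 1, 1) (a, b) = (1, 2, 2) := by
          norm_num [stepB, hab, not_lt_of_gt hab]
        obtain ⟨g1, g2⟩ := main_inv ((b :: t).zip t) (-1) 1 2 1 2 2 (by unfold InvS; norm_num)
        constructor
        · intro _
          rw [eA (0,0,1), sA, eB, sB]
          have hnot : ¬(((((b :: t).zip t)).foldl stepPA (-1, 1, 2)).2.2 = 1 ∧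
              ((((b :: t).zip t)).foldl stepB (1, 2, 2)).2.2 = 2) := by
            rw [g2]
            rintro ⟨h, -⟩
            exact absurd h (by norm_num)
          unfold InvS at g1
          clear g2 hbr eA eB sA sB
          omega
        · intro hD
          obtain ⟨hfst, -, -⟩ := hD
          simp at hfst
          omega

-- ===== VERDICT (by name: the statement is the Claim_ definition above) =====
theorem maxTurbulenceSize2_spec : Claim_unchanged_maxTurbulenceSize2 := by
  intro A _ hD
  exact (master A).1 hD

theorem maxTurbulenceSize2_changed : Claim_changed_maxTurbulenceSize2 := by
  unfold Claim_changed_maxTurbulenceSize2; decide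

theorem maxTurbulenceSize2_tight : Claim_exact_maxTurbulenceSize2 := by
  intro A _ hD
  obtain ⟨h1, h2⟩ := (master A).2 hD
  omega
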